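-- pv_equiv track=rewrite | github.com/taddeus/advent-of-code | 2019/22_spacecards.py | frepeat
-- ===== SOURCE A (Python) =====
-- def fcompose(mod, f, g):
--     a, b = f
--     c, d = g
--     return c * a % mod, (c * b + d) % mod
--
-- def frepeat(f, n, mod):
--     if n == 0:
--         return 1, 0
--     if n == 1:
--         return f
--     half, odd = divmod(n, 2)
--     g = frepeat(f, half, mod)
--     gg = fcompose(mod, g, g)
--     return fcompose(mod, f, gg) if odd else gg
-- ===== SOURCE B (Python) =====
-- def fcompose(mod, f, g):
--     a, b = f
--     c, d = g
--     return c * a % mod, (c * b + d) % mod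
--
-- def frepeat(f, n, mod):
--     if n == 0:
--         return 1, 0
--     if n == 1:
--         return f
--     result, base = (1, 0), f
--     while n > 0:
--         if n & 1:
--             result = fcompose(mod, result, base)
--         base = fcompose(mod, base, base)
--         n >>= 1
--     return result
-- ===== Notes on version B (the rewrite author's own statement) =====
-- stated objective: alternative
-- what changed: Replaces A's top-down divmod recursion with an iterative bottom-up binary exponentiation-by-squaring loop over the bits of n (valid because all composed factors are the same linear map, so they commute under composition mod mod).
import Mathlib
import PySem

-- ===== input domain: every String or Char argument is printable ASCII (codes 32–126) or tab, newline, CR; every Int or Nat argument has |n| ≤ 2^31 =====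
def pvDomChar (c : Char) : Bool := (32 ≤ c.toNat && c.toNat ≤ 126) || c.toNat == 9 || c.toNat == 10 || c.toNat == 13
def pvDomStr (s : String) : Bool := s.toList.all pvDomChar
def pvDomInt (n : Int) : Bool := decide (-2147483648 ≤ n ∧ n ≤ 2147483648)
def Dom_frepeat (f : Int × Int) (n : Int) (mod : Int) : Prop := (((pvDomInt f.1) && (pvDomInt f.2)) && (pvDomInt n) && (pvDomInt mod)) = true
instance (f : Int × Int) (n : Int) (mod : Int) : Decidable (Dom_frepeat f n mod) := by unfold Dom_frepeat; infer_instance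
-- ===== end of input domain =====

-- B replaces A's top-down divmod recursion by an iterative bottom-up binary
-- exponentiation-by-squaring loop (an alternative decomposition; same O(log n) composition count).


-- ===== PORT A =====
-- helper fcompose(mod, f, g) = (c*a % mod, (c*b + d) % mod) with f=(a,b), g=(c,d)
def fcomposeL (mod : Int) (f g : Int × Int) : Int × Int :=
  (PySem.Int.mod (g.1 * f.1) mod, PySem.Int.mod (g.1 * f.2 + g.2) mod)

def frepeat (f : Int × Int) (n : Int) (mod : Int) : Int × Int :=
  if _h0 : n = 0 then (1, 0)
  else if _h1 : n = 1 then f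
  else if _h2 : n < 0 then (1, 0)  -- totality guard only: Python recurses forever here (RecursionError); outside Pre_
  else
    let half := PySem.Int.floordiv n 2
    let odd := PySem.Int.mod n 2
    let g := frepeat f half mod
    let gg := fcomposeL mod g g
    if odd ≠ 0 then fcomposeL mod f gg else gg
termination_by n.toNat
decreasing_by
  have h := PySem.Int.floordiv_eq_ediv_of_pos (a := n) (b := 2) (by norm_num)
  simp only [h]
  omega

-- ===== PORT B =====
-- the while-loop of Source B over the state (result, base, n); `n >>= 1` is exactly `n // 2`
def frepeatLoop (mod : Int) (result base : Int × Int) (n : Int) : Int × Int :=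
  if _h : 0 < n then
    let result' := if PySem.Int.band n 1 ≠ 0 then fcomposeL mod result base else result
    frepeatLoop mod result' (fcomposeL mod base base) (PySem.Int.floordiv n 2)
  else result
termination_by n.toNat
decreasing_by
  have h := PySem.Int.floordiv_eq_ediv_of_pos (a := n) (b := 2) (by norm_num)
  simp only [h]
  omega

def frepeat_alt (f : Int × Int) (n : Int) (mod : Int) : Int × Int :=
  if n = 0 then (1, 0)
  else if n = 1 then f
  else frepeatLoop mod (1, 0) f n

-- ===== PRECONDITION & SPEC =====
-- Pre_ excludes n < 0 (A recurses forever: RecursionError) and mod = 0 with n ≥ 2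
-- (A's fcompose raises ZeroDivisionError); on every other input A returns normally.
def Pre_frepeat (f : Int × Int) (n : Int) (mod : Int) : Prop := 0 ≤ n ∧ (n ≤ 1 ∨ mod ≠ 0)
instance (f : Int × Int) (n : Int) (mod : Int) : Decidable (Pre_frepeat f n mod) := by unfold Pre_frepeat; infer_instance

def pvWitness_frepeat : (Int × Int) × Int × Int := ((3, 4), 5, 7)

def Spec_frepeat (f : Int × Int) (n : Int) (mod : Int) (out : Int × Int) : Prop := out = frepeat_alt f n mod
instance (f : Int × Int) (n : Int) (mod : Int) (out : Int × Int) : Decidable (Spec_frepeat f n mod out) := by unfold Spec_frepeat; infer_instance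

-- ===== CLAIM (what is proved, stated in full; the proofs are below) =====
def Claim_equal_frepeat : Prop := ∀ (f : Int × Int) (n : Int) (mod : Int), Dom_frepeat f n mod → Pre_frepeat f n mod → Spec_frepeat f n mod (frepeat f n mod)

-- ===== LEMMAS AND PROOFS =====

-- unreduced composition, componentwise reduction, iterated composition
def comp (f g : Int × Int) : Int × Int := (g.1 * f.1, g.1 * f.2 + g.2)
def red (m : Int) (p : Int × Int) : Int × Int := (p.1.fmod m, p.2.fmod m)
def cpow (b : Int × Int) : Nat → Int × Int
  | 0 => (1, 0)
  | k + 1 => comp b (cpow b k)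

lemma cpow_succ (b : Int × Int) (k : Nat) : cpow b (k + 1) = comp b (cpow b k) := rfl

-- fmod congruence facts
lemma fm_mul (m a b : Int) : (a * b).fmod m = (a.fmod m * b).fmod m := by
  conv_lhs => rw [← Int.fmod_add_mul_fdiv a m]
  rw [add_mul, mul_assoc]
  exact Int.add_mul_fmod_self_left _ _ _

lemma fm_add (m a b : Int) : (a + b).fmod m = (a.fmod m + b).fmod m := by
  conv_lhs => rw [← Int.fmod_add_mul_fdiv a m]
  rw [add_right_comm]
  exact Int.add_mul_fmod_self_left _ _ _

lemma fm_fm (m a : Int) : (a.fmod m).fmod m = a.fmod m :=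
  Int.fmod_fmod_of_dvd a dvd_rfl

lemma fm_mul₂ (m a b : Int) : (a * b).fmod m = (a.fmod m * b.fmod m).fmod m := by
  rw [fm_mul, mul_comm, fm_mul, mul_comm]

lemma fm_add₂ (m a b : Int) : (a + b).fmod m = (a.fmod m + b.fmod m).fmod m := by
  rw [fm_add, add_comm, fm_add, add_comm]

-- componentwise congruence mod m
def Cong (m : Int) (p q : Int × Int) : Prop := p.1.fmod m = q.1.fmod m ∧ p.2.fmod m = q.2.fmod m

lemma cong_refl (m : Int) (p : Int × Int) : Cong m p p := ⟨rfl, rfl⟩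

lemma cong_red (m : Int) (p : Int × Int) : Cong m (red m p) p := ⟨fm_fm m p.1, fm_fm m p.2⟩

lemma cong_red_eq {m : Int} {p q : Int × Int} (h : Cong m p q) : red m p = red m q := by
  simp only [red, Prod.mk.injEq]
  exact h

lemma comp_cong {m : Int} {p p' q q' : Int × Int} (hp : Cong m p p') (hq : Cong m q q') :
    Cong m (comp p q) (comp p' q') := by
  obtain ⟨hp1, hp2⟩ := hp
  obtain ⟨hq1, hq2⟩ := hq
  constructor
  · show (q.1 * p.1).fmod m = (q'.1 * p'.1).fmod m
    rw [fm_mul₂, hq1, hp1, ← fm_mul₂]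
  · show (q.1 * p.2 + q.2).fmod m = (q'.1 * p'.2 + q'.2).fmod m
    rw [fm_add₂, fm_mul₂, hq1, hp2, hq2, ← fm_mul₂, ← fm_add₂]

lemma cpow_cong {m : Int} {b b' : Int × Int} (h : Cong m b b') (k : Nat) :
    Cong m (cpow b k) (cpow b' k) := by
  induction k with
  | zero => exact cong_refl m _
  | succ k ih => exact comp_cong h ih

-- fcomposeL is reduced unreduced composition
lemma fcomposeL_eq (m : Int) (p q : Int × Int) : fcomposeL m p q = red m (comp p q) := rfl

-- monoid facts
lemma comp_assoc (x y z : Int × Int) : comp (comp x y) z = comp x (comp y z) := by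
  simp only [comp, Prod.mk.injEq]
  constructor <;> ring

lemma comp_one_left (x : Int × Int) : comp (1, 0) x = x := by
  cases x; simp [comp]

lemma comp_one_right (x : Int × Int) : comp x (1, 0) = x := by
  cases x; simp [comp]

lemma cpow_add (b : Int × Int) (k l : Nat) : cpow b (k + l) = comp (cpow b k) (cpow b l) := by
  induction k with
  | zero => simp [cpow, comp_one_left]
  | succ k ih =>
    rw [Nat.succ_add, cpow_succ, cpow_succ, ih, comp_assoc]

lemma cpow_double (b : Int × Int) (k : Nat) : cpow (comp b b) k = cpow b (2 * k) := by
  induction k with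
  | zero => rfl
  | succ k ih =>
    rw [cpow_succ, ih, comp_assoc, show 2 * (k + 1) = (2 * k + 1) + 1 by omega,
        cpow_succ, cpow_succ]

-- pushing reductions out
lemma red_comp_red_right (m : Int) (x y : Int × Int) :
    red m (comp x (red m y)) = red m (comp x y) :=
  cong_red_eq (comp_cong (cong_refl m x) (cong_red m y))

lemma red_comp_red_left (m : Int) (x y : Int × Int) :
    red m (comp (red m x) y) = red m (comp x y) :=
  cong_red_eq (comp_cong (cong_red m x) (cong_refl m y))

lemma red_comp_red_both (m : Int) (x y : Int × Int) :
    red m (comp (red m x) (red m y)) = red m (comp x y) :=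
  cong_red_eq (comp_cong (cong_red m x) (cong_red m y))

lemma red_comp_cpow_red (m : Int) (x y : Int × Int) (k : Nat) :
    red m (comp x (cpow (red m y) k)) = red m (comp x (cpow y k)) :=
  cong_red_eq (comp_cong (cong_refl m x) (cpow_cong (cong_red m y) k))

-- division facts used on both sides
lemma div2_facts (n : Int) :
    PySem.Int.floordiv n 2 * 2 + PySem.Int.mod n 2 = n ∧
    0 ≤ PySem.Int.mod n 2 ∧ PySem.Int.mod n 2 < 2 :=
  ⟨PySem.Int.floordiv_mul_add_mod n 2,
   PySem.Int.mod_nonneg n (by norm_num),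
   PySem.Int.mod_lt n (by norm_num)⟩

-- B-side loop invariant
lemma loop_inv (m : Int) : ∀ (N : Nat) (r b : Int × Int) (n : Int), n.toNat = N → 0 < n →
    frepeatLoop m r b n = red m (comp r (cpow b n.toNat)) := by
  intro N
  induction N using Nat.strong_induction_on with
  | _ N IH =>
    intro r b n hN hn
    obtain ⟨hdm, ho0, ho2⟩ := div2_facts n
    rw [frepeatLoop, dif_pos hn]
    simp only [PySem.Int.band_one]
    by_cases hq : 0 < PySem.Int.floordiv n 2
    · -- n ≥ 2: the loop runs again
      have hlt : (PySem.Int.floordiv n 2).toNat < N := by omega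
      have hrec := fun r' b' => IH _ hlt r' b' (PySem.Int.floordiv n 2) rfl hq
      by_cases ho : PySem.Int.mod n 2 = 0
      · rw [if_neg (not_ne_iff.mpr ho), hrec, fcomposeL_eq, red_comp_cpow_red, cpow_double,
            show 2 * (PySem.Int.floordiv n 2).toNat = n.toNat by omega]
      · have ho1 : PySem.Int.mod n 2 = 1 := by omega
        rw [if_pos (by rw [ho1]; norm_num), hrec, fcomposeL_eq, fcomposeL_eq, red_comp_cpow_red,
            cpow_double, red_comp_red_left, comp_assoc, ← cpow_succ,
            show 2 * (PySem.Int.floordiv n 2).toNat + 1 = n.toNat by omega]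
    · -- n = 1: one more iteration, then the loop stops
      have hn1 : n = 1 := by omega
      subst hn1
      rw [if_pos (by decide : PySem.Int.mod 1 2 ≠ 0),
          show PySem.Int.floordiv 1 2 = 0 from by decide,
          frepeatLoop, dif_neg (by norm_num : ¬ (0:Int) < 0), fcomposeL_eq,
          show cpow b (Int.toNat 1) = comp b (1, 0) from rfl, comp_one_right]

-- A-side characterisation: for n ≥ 2, A returns the reduced n-th compositional power
lemma A_inv (m : Int) (f : Int × Int) : ∀ (N : Nat) (n : Int), n.toNat = N → 2 ≤ n →
    frepeat f n m = red m (cpow f n.toNat) := by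
  intro N
  induction N using Nat.strong_induction_on with
  | _ N IH =>
    intro n hN hn2
    obtain ⟨hdm, ho0, ho2⟩ := div2_facts n
    rw [frepeat, dif_neg (by omega : ¬ n = 0), dif_neg (by omega : ¬ n = 1),
        dif_neg (by omega : ¬ n < 0)]
    simp only []
    by_cases hq1 : PySem.Int.floordiv n 2 = 1
    · -- n = 2 or 3: the recursive call returns f unreduced
      have hg : frepeat f (PySem.Int.floordiv n 2) m = f := by
        rw [hq1, frepeat, dif_neg (by norm_num : ¬ (1:Int) = 0), dif_pos rfl]
      rw [hg]
      by_cases ho : PySem.Int.mod n 2 = 0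
      · rw [if_neg (not_ne_iff.mpr ho), fcomposeL_eq, show n.toNat = 2 by omega]
        rw [show cpow f 2 = comp f (comp f (1, 0)) from rfl, comp_one_right]
      · have ho1 : PySem.Int.mod n 2 = 1 := by omega
        rw [if_pos (by rw [ho1]; norm_num), fcomposeL_eq, fcomposeL_eq, red_comp_red_right,
            show n.toNat = 3 by omega]
        rw [show cpow f 3 = comp f (comp f (comp f (1, 0))) from rfl, comp_one_right]
    · -- half ≥ 2: use the induction hypothesis
      have hq2 : 2 ≤ PySem.Int.floordiv n 2 := by omega
      have hlt : (PySem.Int.floordiv n 2).toNat < N := by omega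
      have hrec := IH _ hlt (PySem.Int.floordiv n 2) rfl hq2
      rw [hrec]
      by_cases ho : PySem.Int.mod n 2 = 0
      · rw [if_neg (not_ne_iff.mpr ho), fcomposeL_eq, red_comp_red_both, ← cpow_add,
            show (PySem.Int.floordiv n 2).toNat + (PySem.Int.floordiv n 2).toNat = n.toNat by omega]
      · have ho1 : PySem.Int.mod n 2 = 1 := by omega
        rw [if_pos (by rw [ho1]; norm_num), fcomposeL_eq, fcomposeL_eq, red_comp_red_right]
        rw [cong_red_eq (comp_cong (cong_refl m f)
              (comp_cong (cong_red m _) (cong_red m _)))]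
        rw [← cpow_add, ← cpow_succ,
            show (PySem.Int.floordiv n 2).toNat + (PySem.Int.floordiv n 2).toNat + 1 = n.toNat by omega]

-- ===== VERDICT (by name: the statement is the Claim_ definition above) =====
theorem frepeat_spec : Claim_equal_frepeat := by
  intro f n mod hdom hpre
  show frepeat f n mod = frepeat_alt f n mod
  obtain ⟨hn0, _⟩ := hpre
  by_cases h0 : n = 0
  · subst h0
    rw [frepeat, dif_pos rfl, frepeat_alt, if_pos rfl]
  · by_cases h1 : n = 1
    · subst h1
      rw [frepeat, dif_neg (by norm_num : ¬ (1:Int) = 0), dif_pos rfl,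
          frepeat_alt, if_neg (by norm_num : ¬ (1:Int) = 0), if_pos rfl]
    · have hn2 : 2 ≤ n := by omega
      rw [A_inv mod f n.toNat n rfl hn2, frepeat_alt, if_neg h0, if_neg h1,
          loop_inv mod n.toNat (1, 0) f n rfl (by omega), comp_one_left]
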